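-- pv_equiv track=rewrite | github.com/miaosakurai/1leetcode1day | 1124. Longest Well-Performing Interval.py | longestWPI_tle
-- ===== SOURCE A (Python) =====
-- def longestWPI_tle(hours) -> int:
--     # tiring day: hours[i]>8
--     res = 0
--     n = len(hours)
--     for i in range(n):
--         tiring, non_tiring = 0, 0
--         for j in range(i, n):
--             if hours[j]>8:
--                 tiring += 1
--             else:
--                 non_tiring += 1
--             if tiring > non_tiring:
--                 res = max(res, j-i+1)
--     return res
-- ===== SOURCE B (Python) =====
-- def longestWPI_tle(hours) -> int:
--     # O(n) prefix-score pass: score = (#tiring - #non-tiring) so far; an interval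
--     # ending at j is well-performing iff some earlier prefix score is < current score.
--     # 'first' records the first index at which each non-positive score occurs.
--     res, score = 0, 0
--     first = {}
--     for j in range(len(hours)):
--         score += 1 if hours[j] > 8 else -1
--         if score > 0:
--             res = j + 1
--         else:
--             first.setdefault(score, j)
--             if score - 1 in first:
--                 res = max(res, j - first[score - 1])
--     return res
-- ===== Notes on version B (the rewrite author's own statement) =====
-- stated objective: faster
-- what changed: Replaces A's nested loops that recount tiring/non-tiring days for every start index with a single pass over a running prefix score (+1/-1) and a dict recording the first index of each non-positive score.
import Mathlib
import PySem

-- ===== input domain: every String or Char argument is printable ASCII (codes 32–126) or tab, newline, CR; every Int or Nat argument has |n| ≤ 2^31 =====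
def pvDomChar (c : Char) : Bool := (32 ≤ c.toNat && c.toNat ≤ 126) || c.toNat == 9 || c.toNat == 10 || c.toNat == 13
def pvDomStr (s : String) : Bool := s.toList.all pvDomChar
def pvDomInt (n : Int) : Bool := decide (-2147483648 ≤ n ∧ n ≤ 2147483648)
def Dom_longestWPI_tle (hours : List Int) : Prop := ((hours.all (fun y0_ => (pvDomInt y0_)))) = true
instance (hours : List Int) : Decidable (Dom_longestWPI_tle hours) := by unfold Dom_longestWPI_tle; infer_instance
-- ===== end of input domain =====

-- B replaces A's nested all-starts × all-ends counting loops by a single prefix-score pass with a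
-- dict of first occurrences of each non-positive score (objective: faster).

-- ===== PORT A =====
-- body of A's inner loop over j (state: res, tiring, non_tiring)
def abody (hours : List Int) (i : Int) (st : Int × Int × Int) (j : Int) : Int × Int × Int :=
  let res := st.1
  let tn := if PySem.List.pyGetD hours j 0 > 8 then (st.2.1 + 1, st.2.2) else (st.2.1, st.2.2 + 1)
  if tn.1 > tn.2 then (max res (j - i + 1), tn.1, tn.2) else (res, tn.1, tn.2)

def longestWPI_tle (hours : List Int) : Int :=
  let n : Int := (hours.length : Int)
  (PySem.List.pyRange 0 n 1).foldl
    (fun res i => ((PySem.List.pyRange i n 1).foldl (abody hours i) (res, 0, 0)).1) 0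

-- ===== PORT B =====
-- body of B's single loop over j (state: res, score, first)
def bbody (hours : List Int) (st : Int × Int × PySem.Dict Int Int) (j : Int) :
    Int × Int × PySem.Dict Int Int :=
  let res := st.1
  let score := st.2.1 + (if PySem.List.pyGetD hours j 0 > 8 then 1 else -1)
  let first := st.2.2
  if score > 0 then (j + 1, score, first)
  else
    let first := first.setdefault score j
    match first.get? (score - 1) with
    | some k => (max res (j - k), score, first)
    | none => (res, score, first)

def longestWPI_tle_alt (hours : List Int) : Int :=
  ((PySem.List.pyRange 0 (hours.length : Int) 1).foldl (bbody hours)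
    (0, 0, PySem.Dict.empty)).1

-- ===== PRECONDITION & SPEC =====
def Spec_longestWPI_tle (hours : List Int) (out : Int) : Prop := out = longestWPI_tle_alt hours
instance (hours : List Int) (out : Int) : Decidable (Spec_longestWPI_tle hours out) := by unfold Spec_longestWPI_tle; infer_instance

-- ===== CLAIM (what is proved, stated in full; the proofs are below) =====
def Claim_equal_longestWPI_tle : Prop := ∀ (hours : List Int), Dom_longestWPI_tle hours → Spec_longestWPI_tle hours (longestWPI_tle hours)

-- ===== LEMMAS AND PROOFS =====

-- +1 for a tiring day (hours > 8), -1 otherwise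
def stepv (h : Int) : Int := if h > 8 then 1 else -1

-- prefix score: #tiring − #non-tiring among the first k days
def pscore (hours : List Int) (k : Nat) : Int := ((hours.take k).map stepv).sum

-- the day interval [i, j) is well-performing
def GoodWPI (hours : List Int) (i j : Nat) : Prop :=
  i < j ∧ j ≤ hours.length ∧ pscore hours i < pscore hours j

-- R is the length of the longest well-performing interval (0 if none)
def IsBestWPI (hours : List Int) (R : Int) : Prop :=
  (0 ≤ R) ∧
  (∀ i j : Nat, GoodWPI hours i j → (j : Int) - (i : Int) ≤ R) ∧
  (R = 0 ∨ ∃ i j : Nat, GoodWPI hours i j ∧ R = (j : Int) - (i : Int))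

theorem pscore_succ (hours : List Int) (k : Nat) (hk : k < hours.length) :
    pscore hours (k + 1) = pscore hours k + stepv (hours.getD k 0) := by
  unfold pscore
  rw [List.take_add_one, List.getElem?_eq_getElem hk]
  simp [List.getD_eq_getElem?_getD, List.getElem?_eq_getElem hk]
  have hk' : k < (List.map stepv hours).length := by simpa using hk
  rw [List.take_add_one, List.getElem?_eq_getElem hk']
  simp

theorem pscore_step (hours : List Int) (k : Nat) (hk : k < hours.length) :
    pscore hours (k + 1) = pscore hours k + 1 ∨ pscore hours (k + 1) = pscore hours k - 1 := by
  rw [pscore_succ hours k hk]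
  unfold stepv
  split_ifs <;> omega

-- discrete intermediate-value: the ±1-step walk from pscore 0 = 0 down to pscore i ≤ c hits c
theorem pscore_ivt_down (hours : List Int) (c : Int) (hc : c ≤ 0) :
    ∀ i : Nat, i ≤ hours.length → pscore hours i ≤ c → ∃ t : Nat, t ≤ i ∧ pscore hours t = c := by
  intro i
  induction i with
  | zero => intro _ h; exact ⟨0, le_refl _, by simp [pscore] at h ⊢; omega⟩
  | succ n ih =>
    intro hn h
    by_cases he : pscore hours (n + 1) = c
    · exact ⟨n + 1, le_refl _, he⟩
    · have hs := pscore_step hours n (by omega)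
      obtain ⟨t, ht, hte⟩ := ih (by omega) (by omega)
      exact ⟨t, by omega, hte⟩

theorem isBest_unique (hours : List Int) (R1 R2 : Int)
    (h1 : IsBestWPI hours R1) (h2 : IsBestWPI hours R2) : R1 = R2 := by
  obtain ⟨h10, h1ub, h1ach⟩ := h1
  obtain ⟨h20, h2ub, h2ach⟩ := h2
  rcases h1ach with he1 | ⟨i1, j1, hg1, hv1⟩ <;> rcases h2ach with he2 | ⟨i2, j2, hg2, hv2⟩
  · omega
  · have := h1ub i2 j2 hg2
    have := hg2.1
    omega
  · have := h2ub i1 j1 hg1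
    have := hg1.1
    omega
  · have := h1ub i2 j2 hg2
    have := h2ub i1 j1 hg1
    omega

-- ---------- A-side ----------

theorem abody_fst (hours : List Int) (i j : Int) (st : Int × Int × Int) :
    (abody hours i st j).1 =
      if 0 < st.2.1 - st.2.2 + stepv (PySem.List.pyGetD hours j 0) then max st.1 (j - i + 1) else st.1 := by
  rcases st with ⟨r, t, nt⟩
  simp only [abody, stepv]
  split_ifs <;> first | rfl | omega

theorem abody_diff (hours : List Int) (i j : Int) (st : Int × Int × Int) :
    (abody hours i st j).2.1 - (abody hours i st j).2.2 =
      st.2.1 - st.2.2 + stepv (PySem.List.pyGetD hours j 0) := by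
  rcases st with ⟨r, t, nt⟩
  simp only [abody, stepv]
  split_ifs <;> simp <;> omega

theorem innerA_spec (hours : List Int) (i : Nat) (r : Int) :
    ∀ m : Nat, i + m ≤ hours.length →
    (let st := (PySem.List.pyRange (i : Int) ((i : Int) + (m : Int)) 1).foldl (abody hours (i : Int)) (r, 0, 0)
     st.2.1 - st.2.2 = pscore hours (i + m) - pscore hours i ∧
     r ≤ st.1 ∧
     (∀ j : Nat, i < j → j ≤ i + m → pscore hours i < pscore hours j → (j : Int) - (i : Int) ≤ st.1) ∧
     (st.1 = r ∨ ∃ j : Nat, i < j ∧ j ≤ i + m ∧ pscore hours i < pscore hours j ∧ st.1 = (j : Int) - (i : Int))) := by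
  intro m
  induction m with
  | zero =>
    intro _
    rw [show ((i : Int) + ((0 : Nat) : Int)) = (i : Int) by push_cast; ring,
        PySem.List.pyRange_one_eq_nil (le_refl (i : Int)), List.foldl_nil]
    exact ⟨by simp, le_refl r, fun j h1 h2 h3 => by omega, Or.inl rfl⟩
  | succ m ih =>
    intro hm
    obtain ⟨hdiff, hrle, hub, hach⟩ := ih (by omega)
    have hsplit : PySem.List.pyRange (i : Int) ((i : Int) + ((m + 1 : Nat) : Int)) 1
        = PySem.List.pyRange (i : Int) ((i : Int) + (m : Int)) 1 ++ [(i : Int) + (m : Int)] := by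
      rw [show ((i : Int) + ((m + 1 : Nat) : Int)) = ((i : Int) + (m : Int)) + 1 by push_cast; ring]
      exact PySem.List.pyRange_one_succ_right (a := (i : Int)) (b := (i : Int) + (m : Int)) (by omega)
    rw [hsplit, List.foldl_append, List.foldl_cons, List.foldl_nil]
    set st0 := (PySem.List.pyRange (i : Int) ((i : Int) + (m : Int)) 1).foldl (abody hours (i : Int)) (r, 0, 0) with hst0
    have hlen : i + m < hours.length := by omega
    have hget : PySem.List.pyGetD hours ((i : Int) + (m : Int)) 0 = hours.getD (i + m) 0 := by
      rw [show ((i : Int) + (m : Int)) = ((i + m : Nat) : Int) by push_cast; ring]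
      exact PySem.List.pyGetD_natCast hours (i + m) 0
    have hps : pscore hours (i + m + 1) =
        pscore hours (i + m) + stepv (PySem.List.pyGetD hours ((i : Int) + (m : Int)) 0) := by
      rw [hget]; exact pscore_succ hours (i + m) hlen
    have hstep : stepv (PySem.List.pyGetD hours ((i : Int) + (m : Int)) 0) = 1 ∨
        stepv (PySem.List.pyGetD hours ((i : Int) + (m : Int)) 0) = -1 := by
      unfold stepv; split_ifs <;> simp
    refine ⟨?_, ?_, ?_, ?_⟩
    · rw [abody_diff, hdiff, show i + (m + 1) = i + m + 1 from rfl, hps]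
      ring
    · rw [abody_fst]
      split_ifs with h
      · exact le_trans hrle (le_max_left _ _)
      · exact hrle
    · intro j h1 h2 h3
      rw [abody_fst]
      have hcond : (0 < st0.2.1 - st0.2.2 + stepv (PySem.List.pyGetD hours ((i : Int) + (m : Int)) 0))
          ↔ pscore hours i < pscore hours (i + m + 1) := by omega
      rcases Nat.lt_or_ge j (i + m + 1) with hj | hj
      · have hle := hub j h1 (by omega) h3
        split_ifs with h
        · exact le_trans hle (le_max_left _ _)
        · exact hle
      · have hje : j = i + m + 1 := by omega
        subst hje
        rw [if_pos (hcond.mpr (by rwa [show i + m + 1 = i + (m + 1) from rfl] at h3 ⊢))]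
        have : ((i + m + 1 : Nat) : Int) - (i : Int) = (i : Int) + (m : Int) - (i : Int) + 1 := by push_cast; ring
        rw [this]
        exact le_max_right _ _
    · rw [abody_fst]
      split_ifs with h
      · rcases max_choice st0.1 ((i : Int) + (m : Int) - (i : Int) + 1) with hmx | hmx
        · rw [hmx]
          rcases hach with hc | ⟨j, hj1, hj2, hj3, hj4⟩
          · exact Or.inl hc
          · exact Or.inr ⟨j, hj1, by omega, hj3, hj4⟩
        · rw [hmx]
          refine Or.inr ⟨i + m + 1, by omega, by omega, by omega, by push_cast; ring⟩
      · rcases hach with hc | ⟨j, hj1, hj2, hj3, hj4⟩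
        · exact Or.inl hc
        · exact Or.inr ⟨j, hj1, by omega, hj3, hj4⟩

theorem outerA_spec (hours : List Int) :
    ∀ m : Nat, m ≤ hours.length →
    (let R := (PySem.List.pyRange 0 (m : Int) 1).foldl
        (fun res i => ((PySem.List.pyRange i (hours.length : Int) 1).foldl (abody hours i) (res, 0, 0)).1) 0
     0 ≤ R ∧
     (∀ i j : Nat, i < m → GoodWPI hours i j → (j : Int) - (i : Int) ≤ R) ∧
     (R = 0 ∨ ∃ i j : Nat, i < m ∧ GoodWPI hours i j ∧ R = (j : Int) - (i : Int))) := by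
  intro m
  induction m with
  | zero =>
    intro _
    rw [show ((0 : Nat) : Int) = (0 : Int) from rfl, PySem.List.pyRange_one_eq_nil (le_refl 0), List.foldl_nil]
    exact ⟨le_refl 0, fun i j h => by omega, Or.inl rfl⟩
  | succ m ih =>
    intro hm
    obtain ⟨hR0, hub, hach⟩ := ih (by omega)
    have hsplit : PySem.List.pyRange 0 ((m + 1 : Nat) : Int) 1
        = PySem.List.pyRange 0 (m : Int) 1 ++ [(m : Int)] := by
      rw [show (((m + 1 : Nat)) : Int) = (m : Int) + 1 by push_cast; ring]
      exact PySem.List.pyRange_one_succ_right (a := 0) (b := (m : Int)) (by omega)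
    rw [hsplit, List.foldl_append, List.foldl_cons, List.foldl_nil]
    set R0 := (PySem.List.pyRange 0 (m : Int) 1).foldl
        (fun res i => ((PySem.List.pyRange i (hours.length : Int) 1).foldl (abody hours i) (res, 0, 0)).1) 0 with hR0def
    have hn : ((hours.length : Nat) : Int) = (m : Int) + ((hours.length - m : Nat) : Int) := by omega
    have hinner := innerA_spec hours m R0 (hours.length - m) (by omega)
    rw [← hn] at hinner
    obtain ⟨_, hrle, hiub, hiach⟩ := hinner
    have hmn : m + (hours.length - m) = hours.length := by omega
    rw [hmn] at hiub hiach
    refine ⟨le_trans hR0 hrle, ?_, ?_⟩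
    · intro i j hi hg
      obtain ⟨h1, h2, h3⟩ := hg
      rcases Nat.lt_or_ge i m with him | him
      · exact le_trans (hub i j him ⟨h1, h2, h3⟩) hrle
      · have : i = m := by omega
        subst this
        exact hiub j h1 h2 h3
    · rcases hiach with he | ⟨j, hj1, hj2, hj3, hj4⟩
      · rw [he]
        rcases hach with hc | ⟨i, j, hi, hg, hv⟩
        · exact Or.inl hc
        · exact Or.inr ⟨i, j, by omega, hg, hv⟩
      · exact Or.inr ⟨m, j, by omega, ⟨hj1, hj2, hj3⟩, hj4⟩

theorem A_isBest (hours : List Int) : IsBestWPI hours (longestWPI_tle hours) := by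
  obtain ⟨h0, hub, hach⟩ := outerA_spec hours hours.length (le_refl _)
  refine ⟨h0, ?_, ?_⟩
  · intro i j hg
    obtain ⟨h1, h2, h3⟩ := hg
    exact hub i j (by omega) ⟨h1, h2, h3⟩
  · rcases hach with hc | ⟨i, j, _, hg, hv⟩
    · exact Or.inl hc
    · exact Or.inr ⟨i, j, hg, hv⟩

-- ---------- B-side ----------

theorem B_inv (hours : List Int) :
    ∀ m : Nat, m ≤ hours.length →
    (let st := (PySem.List.pyRange 0 (m : Int) 1).foldl (bbody hours) (0, 0, PySem.Dict.empty)
     st.2.1 = pscore hours m ∧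
     (∀ (v k : Int), st.2.2.get? v = some k →
        ∃ jk : Nat, k = (jk : Int) ∧ jk < m ∧ pscore hours (jk + 1) = v ∧
          ∀ j' : Nat, j' < jk → pscore hours (j' + 1) ≠ v) ∧
     (∀ v : Int, v ≤ 0 → ∀ j : Nat, j < m → pscore hours (j + 1) = v → st.2.2.contains v = true) ∧
     0 ≤ st.1 ∧
     (∀ i j : Nat, i < j → j ≤ m → pscore hours i < pscore hours j → (j : Int) - (i : Int) ≤ st.1) ∧
     (st.1 = 0 ∨ ∃ i j : Nat, i < j ∧ j ≤ m ∧ pscore hours i < pscore hours j ∧ st.1 = (j : Int) - (i : Int))) := by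
  intro m
  induction m with
  | zero =>
    intro _
    rw [show ((0 : Nat) : Int) = (0 : Int) from rfl, PySem.List.pyRange_one_eq_nil (le_refl 0), List.foldl_nil]
    refine ⟨rfl, ?_, ?_, le_refl 0, ?_, Or.inl rfl⟩
    · intro v k h; rw [PySem.Dict.get?_empty] at h; exact absurd h (by simp)
    · intro v _ j hj; omega
    · intro i j h1 h2; omega
  | succ m ih =>
    intro hm
    obtain ⟨hs0, hdget, hdcont, hr0, hub, hach⟩ := ih (by omega)
    have hlen : m < hours.length := by omega
    have hsplit : PySem.List.pyRange 0 ((m + 1 : Nat) : Int) 1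
        = PySem.List.pyRange 0 (m : Int) 1 ++ [(m : Int)] := by
      rw [show (((m + 1 : Nat)) : Int) = (m : Int) + 1 by push_cast; ring]
      exact PySem.List.pyRange_one_succ_right (a := 0) (b := (m : Int)) (by omega)
    rw [hsplit, List.foldl_append, List.foldl_cons, List.foldl_nil]
    set st0 := (PySem.List.pyRange 0 (m : Int) 1).foldl (bbody hours) (0, 0, PySem.Dict.empty) with hst0
    have hE : st0.2.1 + (if PySem.List.pyGetD hours ((m : Nat) : Int) 0 > 8 then (1 : Int) else -1)
        = pscore hours (m + 1) := by
      rw [show (if PySem.List.pyGetD hours ((m : Nat) : Int) 0 > 8 then (1 : Int) else -1)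
            = stepv (PySem.List.pyGetD hours ((m : Nat) : Int) 0) from rfl,
          PySem.List.pyGetD_natCast, hs0, ← pscore_succ hours m hlen]
    simp only [bbody, hE]
    by_cases hpos : pscore hours (m + 1) > 0
    · rw [if_pos hpos]
      refine ⟨rfl, ?_, ?_, by positivity, ?_, ?_⟩
      · intro v k h
        obtain ⟨jk, h1, h2, h3, h4⟩ := hdget v k h
        exact ⟨jk, h1, by omega, h3, h4⟩
      · intro v hv j hj hp
        rcases Nat.lt_or_ge j m with hj' | hj'
        · exact hdcont v hv j hj' hp
        · have : j = m := by omega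
          subst this; omega
      · intro i j h1 h2 h3
        simp only
        omega
      · refine Or.inr ⟨0, m + 1, by omega, le_refl _, ?_, by push_cast; ring⟩
        rw [show pscore hours 0 = 0 from rfl]; omega
    · rw [if_neg hpos]
      set s := pscore hours (m + 1) with hsdef
      set first' := st0.2.2.setdefault s ((m : Nat) : Int) with hf'
      -- the updated dict still maps each stored score to its first occurrence …
      have h2a : ∀ (v k : Int), first'.get? v = some k →
          ∃ jk : Nat, k = (jk : Int) ∧ jk < m + 1 ∧ pscore hours (jk + 1) = v ∧
            ∀ j' : Nat, j' < jk → pscore hours (j' + 1) ≠ v := by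
        intro v k h
        by_cases hvs : v = s
        · subst hvs
          rw [hf', PySem.Dict.get?_setdefault_self] at h
          cases hc : st0.2.2.get? s with
          | some k0 =>
            rw [hc] at h
            simp at h
            obtain ⟨jk, h1, h2, h3, h4⟩ := hdget s k0 hc
            exact ⟨jk, by omega, by omega, h3, h4⟩
          | none =>
            rw [hc] at h
            simp at h
            refine ⟨m, by omega, by omega, hsdef.symm, ?_⟩
            intro j' hj' hp
            have := hdcont s (by omega) j' hj' hp
            rw [PySem.Dict.contains_eq_isSome_get?, hc] at this
            simp at this
        · rw [hf', PySem.Dict.get?_setdefault_of_ne _ _ hvs] at h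
          obtain ⟨jk, h1, h2, h3, h4⟩ := hdget v k h
          exact ⟨jk, h1, by omega, h3, h4⟩
      -- … and still contains every non-positive score seen so far
      have h2b : ∀ v : Int, v ≤ 0 → ∀ j : Nat, j < m + 1 → pscore hours (j + 1) = v →
          first'.contains v = true := by
        intro v hv j hj hp
        rw [hf', PySem.Dict.contains_setdefault]
        rcases Nat.lt_or_ge j m with hj' | hj'
        · rw [hdcont v hv j hj' hp]; simp
        · have : j = m := by omega
          subst this
          have : v = s := by omega
          subst this; simp
      cases hfind : first'.get? (s - 1) with
      | some k =>
        simp only []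
        obtain ⟨jk, hk1, hk2, hk3, hk4⟩ := h2a (s - 1) k hfind
        have hjkm : jk < m := by
          rcases Nat.lt_or_ge jk m with h | h
          · exact h
          · exfalso; have : jk = m := by omega
            subst this; omega
        subst hk1
        refine ⟨trivial, h2a, h2b, le_trans hr0 (le_max_left _ _), ?_, ?_⟩
        · intro i j h1 h2 h3
          rcases Nat.lt_or_ge j (m + 1) with hj | hj
          · exact le_trans (hub i j h1 (by omega) h3) (le_max_left _ _)
          · have hje : j = m + 1 := by omega
            subst hje
            have hii : pscore hours i ≤ s - 1 := by omega
            obtain ⟨t, ht1, ht2⟩ := pscore_ivt_down hours (s - 1) (by omega) i (by omega) hii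
            cases t with
            | zero => rw [show pscore hours 0 = 0 from rfl] at ht2; omega
            | succ t' =>
              have : ¬ (t' < jk) := fun hlt => hk4 t' hlt ht2
              refine le_trans ?_ (le_max_right st0.1 (((m : Nat) : Int) - (jk : Int)))
              omega
        · rcases max_choice st0.1 (((m : Nat) : Int) - (jk : Int)) with hmx | hmx
          · rw [hmx]
            rcases hach with hc | ⟨i, j, h1, h2, h3, h4⟩
            · exact Or.inl hc
            · exact Or.inr ⟨i, j, h1, by omega, h3, h4⟩
          · rw [hmx]
            refine Or.inr ⟨jk + 1, m + 1, by omega, le_refl _, by omega, by push_cast; ring⟩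
      | none =>
        simp only []
        refine ⟨trivial, h2a, h2b, hr0, ?_, ?_⟩
        · intro i j h1 h2 h3
          rcases Nat.lt_or_ge j (m + 1) with hj | hj
          · exact hub i j h1 (by omega) h3
          · have hje : j = m + 1 := by omega
            subst hje
            exfalso
            have hii : pscore hours i ≤ s - 1 := by omega
            obtain ⟨t, ht1, ht2⟩ := pscore_ivt_down hours (s - 1) (by omega) i (by omega) hii
            cases t with
            | zero => rw [show pscore hours 0 = 0 from rfl] at ht2; omega
            | succ t' =>
              have hc := h2b (s - 1) (by omega) t' (by omega) ht2
              rw [PySem.Dict.contains_eq_isSome_get?, hfind] at hc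
              simp at hc
        · rcases hach with hc | ⟨i, j, h1, h2, h3, h4⟩
          · exact Or.inl hc
          · exact Or.inr ⟨i, j, h1, by omega, h3, h4⟩

theorem B_isBest (hours : List Int) : IsBestWPI hours (longestWPI_tle_alt hours) := by
  obtain ⟨_, _, _, h0, hub, hach⟩ := B_inv hours hours.length (le_refl _)
  refine ⟨h0, ?_, ?_⟩
  · intro i j hg
    obtain ⟨h1, h2, h3⟩ := hg
    exact hub i j h1 h2 h3
  · rcases hach with hc | ⟨i, j, h1, h2, h3, h4⟩
    · exact Or.inl hc
    · exact Or.inr ⟨i, j, ⟨h1, h2, h3⟩, h4⟩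

-- ===== VERDICT (by name: the statement is the Claim_ definition above) =====
theorem longestWPI_tle_spec : Claim_equal_longestWPI_tle := by
  intro hours _
  exact isBest_unique hours _ _ (A_isBest hours) (B_isBest hours)
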